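-- pv_equiv track=rewrite | github.com/faye-1221/Coding_Test | PROGRAMMERS/level1/135808.py | solution
-- ===== SOURCE A (Python) =====
-- def solution(k, m, score): # 사과 최대 점수, 한 상자에 들어가는 사과의 수
--     result = []
--     score.sort()
--
--     a, d = divmod(len(score), m) # 몫 나머지
--
--     start = d
--     for i in range(a):
--         result.append(score[start:(start+m)])
--         start += m
--
--     # 최저 사과 점수 x 한 상자에 담긴 사과 개수 x 상자의 개수
--     answer = 0
--     for re in result:
--         answer += min(re) * m
--
--     return answer
-- ===== SOURCE B (Python) =====
-- def solution(k, m, score):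
--     # Walk the sorted list top-down in strides of m: each full box taken from the
--     # top has its minimum m positions below the top, so just add score[i] * m for
--     # i = len-m, len-2m, ...; the leftover (< m) apples at the bottom fall out of
--     # the range automatically, so no divmod and no sublists are needed.
--     score.sort()
--     answer = 0
--     for i in range(len(score) - m, -1, -m):
--         answer += score[i] * m
--     return answer
-- ===== Notes on version B (the rewrite author's own statement) =====
-- stated objective: simpler
-- what changed: B replaces A's two staged passes (build a list of m-sized sublists after skipping the remainder, then loop taking min of each) with a single backwards strided index loop from the top of the sorted list: for i in range(len-m, -1, -m) accumulate score[i]*m, so no divmod, no sublists and no min calls; the leftover elements fall out of the range bound automatically.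
import Mathlib
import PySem

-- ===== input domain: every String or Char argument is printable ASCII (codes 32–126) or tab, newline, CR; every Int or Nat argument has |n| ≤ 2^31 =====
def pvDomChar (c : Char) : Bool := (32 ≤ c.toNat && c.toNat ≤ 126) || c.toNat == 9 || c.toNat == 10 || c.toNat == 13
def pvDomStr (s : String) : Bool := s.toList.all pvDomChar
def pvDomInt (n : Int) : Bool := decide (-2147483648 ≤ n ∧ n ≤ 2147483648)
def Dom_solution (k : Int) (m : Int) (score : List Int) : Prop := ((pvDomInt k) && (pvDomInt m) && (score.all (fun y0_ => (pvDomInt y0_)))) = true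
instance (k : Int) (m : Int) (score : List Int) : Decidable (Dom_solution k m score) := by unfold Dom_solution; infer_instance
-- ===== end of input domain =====

-- B replaces A's two staged passes (build the list of m-sized sublists after skipping the
-- remainder, then loop over it taking min of each) with one backwards strided index loop
-- from the top of the sorted list, accumulating score[i] * m (objective: simpler).
-- Both A and B sort `score` in place; the equivalence proved here is about the return value.

-- ===== PORT A =====
-- min(re) raises on [] in Python; within Pre_ (m ≠ 0) every slice in `result` is nonempty,
-- so the .getD 0 default is never used.
def solution (k : Int) (m : Int) (score : List Int) : Int :=
  let s := PySem.List.sorted score (fun x => x)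
  let a := PySem.Int.floordiv (s.length : Int) m
  let d := PySem.Int.mod (s.length : Int) m
  let st := (PySem.List.pyRange 0 a 1).foldl
      (fun (p : List (List Int) × Int) _ =>
        (p.1 ++ [PySem.List.slice s (some p.2) (some (p.2 + m))], p.2 + m))
      ([], d)
  st.1.foldl (fun ans re => ans + (PySem.List.min? re (fun x => x)).getD 0 * m) 0

-- ===== PORT B =====
def solution_alt (k : Int) (m : Int) (score : List Int) : Int :=
  let s := PySem.List.sorted score (fun x => x)
  (PySem.List.pyRange ((s.length : Int) - m) (-1) (-m)).foldl
      (fun ans i => ans + (PySem.List.pyGet? s i).getD 0 * m) 0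

-- ===== PRECONDITION & SPEC =====
-- Pre_ excludes only m = 0, on which A raises ZeroDivisionError (divmod) and B raises
-- ValueError (range step 0).
def Pre_solution (k : Int) (m : Int) (score : List Int) : Prop := m ≠ 0
instance (k : Int) (m : Int) (score : List Int) : Decidable (Pre_solution k m score) := by unfold Pre_solution; infer_instance
def pvWitness_solution : Int × Int × List Int := (10, 3, [7, 1, 5, 2, 6, 4, 3])

def Spec_solution (k : Int) (m : Int) (score : List Int) (out : Int) : Prop := out = solution_alt k m score
instance (k : Int) (m : Int) (score : List Int) (out : Int) : Decidable (Spec_solution k m score out) := by unfold Spec_solution; infer_instance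

-- ===== CLAIM (what is proved, stated in full; the proofs are below) =====
def Claim_equal_solution : Prop := ∀ (k : Int) (m : Int) (score : List Int), Dom_solution k m score → Pre_solution k m score → Spec_solution k m score (solution k m score)

-- ===== LEMMAS AND PROOFS =====

-- folding min over a list the start dominates leaves the start
theorem pv_foldl_min_eq (t : List Int) (x : Int) (h : ∀ y ∈ t, x ≤ y) :
    t.foldl min x = x := by
  induction t generalizing x with
  | nil => rfl
  | cons y t ih =>
    simp only [List.foldl_cons]
    have hxy : x ≤ y := h y (by simp)
    rw [min_eq_left hxy]
    exact ih x (fun z hz => h z (by simp [hz]))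

-- min of a nonempty sorted list is its head
theorem pv_min?_sorted (l : List Int) (hl : l ≠ []) (hs : l.Pairwise (· ≤ ·)) :
    PySem.List.min? l (fun x => x) = l[0]? := by
  obtain ⟨x, t, rfl⟩ := List.exists_cons_of_ne_nil hl
  rw [PySem.List.min?_id_cons]
  have : t.foldl min x = x := pv_foldl_min_eq t x (by
    intro y hy; exact (List.pairwise_cons.mp hs).1 y hy)
  simp [this]

-- a fold whose body ignores the list elements is an iterate
theorem pv_foldl_iterate {A B : Type} (g : A -> A) : forall (l : List B) (init : A),
    l.foldl (fun p _ => g p) init = g^[l.length] init := by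
  intro l
  induction l with
  | nil => intro init; rfl
  | cons x t ih =>
    intro init
    simp only [List.foldl_cons, List.length_cons]
    rw [ih, Function.iterate_succ_apply]

-- A's first loop: closed form of the iterated (result, start) state
theorem pv_loopA (s : List Int) (m : Int) : forall (N : Nat) (res : List (List Int)) (st : Int),
    ((fun (p : List (List Int) × Int) =>
        (p.1 ++ [PySem.List.slice s (some p.2) (some (p.2 + m))], p.2 + m))^[N] (res, st))
    = (res ++ (List.range N).map
        (fun i : Nat => PySem.List.slice s (some (st + (i : Int) * m)) (some (st + (i : Int) * m + m))),
       st + (N : Int) * m) := by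
  intro N
  induction N with
  | zero => intro res st; simp
  | succ N ih =>
    intro res st
    rw [Function.iterate_succ_apply]
    simp only []
    rw [ih (res ++ [PySem.List.slice s (some st) (some (st + m))]) (st + m)]
    rw [List.range_succ_eq_map]
    simp only [List.map_cons, List.map_map, List.append_assoc, List.cons_append, List.nil_append]
    rw [Prod.mk.injEq]
    refine ⟨?_, by push_cast; ring⟩
    congr 1
    simp only [List.cons.injEq]
    refine ⟨by norm_num, ?_⟩
    apply List.map_congr_left
    intro i _
    simp only [Function.comp, Nat.succ_eq_add_one]
    push_cast
    rw [show st + m + (i : Int) * m = st + ((i : Int) + 1) * m from by ring]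

-- a reindexing of the summands by k ↦ n-1-k leaves the sum over range n unchanged
theorem pv_sum_reflect (f : Nat → Int) (n : Nat) :
    ((List.range n).map (fun k => f (n - 1 - k))).sum = ((List.range n).map f).sum := by
  induction n with
  | zero => rfl
  | succ n ih =>
    conv_lhs => rw [List.range_succ_eq_map]
    rw [List.range_succ]
    simp only [List.map_cons, List.map_map, List.sum_cons, List.map_append, List.sum_append,
      List.map_nil, List.sum_nil]
    have h1 : ((List.range n).map ((fun k => f (n + 1 - 1 - k)) ∘ Nat.succ)) = (List.range n).map (fun k => f (n - 1 - k)) := by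
      apply List.map_congr_left; intro i _; simp only [Function.comp]; congr 1; omega
    rw [h1, ih]
    simp only [Nat.add_sub_cancel, Nat.sub_zero]
    ring

-- range(a, b, -s) for s > 0, as a mapped Nat range (unfolds pyRange's count for a negative step)
theorem pv_pyRange_negstep (a b s : Int) (hs : 0 < s) :
    PySem.List.pyRange a b (-s) = (List.range (if b < a then ((a - b + s - 1)/s).toNat else 0)).map (fun k : Nat => a - s*(k:Int)) := by
  have h0 : (-s) ≠ 0 := by omega
  have h1 : ¬ (0 < -s) := by omega
  simp only [PySem.List.pyRange, h0, if_false, h1, if_false, neg_neg]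
  apply List.map_congr_left; intro k _; ring

-- ===== VERDICT =====
theorem solution_spec : Claim_equal_solution := by
  unfold Claim_equal_solution
  intro k m score _ hm
  unfold Spec_solution Pre_solution at *
  simp only [solution, solution_alt]
  set s := PySem.List.sorted score (fun x : Int => x) with hsdef
  set n : Int := (s.length : Int) with hndef
  set a := PySem.Int.floordiv n m with hadef
  set d := PySem.Int.mod n m with hddef
  have hdiv := PySem.Int.floordiv_mul_add_mod n m
  have hn0 : 0 ≤ n := by positivity
  rcases lt_or_gt_of_ne hm with hneg | hpos
  · -- m < 0: both loops are empty
    have hb := PySem.Int.mod_neg_bounds n hneg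
    have ha : a ≤ 0 := by nlinarith [hdiv]
    rw [PySem.List.pyRange_one_eq_nil ha]
    have hmp : (0:Int) < -m := by omega
    rw [PySem.List.pyRange_of_pos (n - m) (-1) hmp]
    rw [if_neg (by omega)]
    simp
  · -- m > 0
    have hd0 : 0 ≤ d := PySem.Int.mod_nonneg n hpos
    have hdm : d < m := PySem.Int.mod_lt n hpos
    have ha0 : 0 ≤ a := by
      rw [hadef]; exact (PySem.Int.le_floordiv_iff_mul_le hpos).mpr (by omega)
    set N := a.toNat with hNdef
    have haN : (N : Int) = a := Int.toNat_of_nonneg ha0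
    have hsum : d + (N : Int) * m = n := by rw [haN]; linarith [hdiv]
    -- B side: the countdown range is the reflected Nat range
    rw [pv_pyRange_negstep (n - m) (-1) m hpos]
    have hcount : (if (-1:Int) < n - m then ((n - m - (-1) + m - 1)/m).toNat else 0) = N := by
      by_cases hmn : m ≤ n
      · rw [if_pos (by omega)]
        have : n - m - (-1) + m - 1 = n := by ring
        rw [this, hNdef, hadef, PySem.Int.floordiv_eq_ediv_of_pos hpos]
      · have hnm : n < m := by omega
        rw [if_neg (by omega)]
        have : a = 0 := by
          rw [hadef]
          exact (PySem.Int.floordiv_eq_iff_of_pos hpos).mpr (by constructor <;> nlinarith)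
        omega
    rw [hcount]
    rw [List.foldl_map]
    -- A side: pyRange as a mapped Nat range, first loop as an iterate with a closed form
    rw [PySem.List.pyRange_one 0 a]
    have hrange : (a - 0).toNat = N := by omega
    rw [hrange, List.foldl_map]
    rw [pv_foldl_iterate (fun (p : List (List Int) × Int) =>
        (p.1 ++ [PySem.List.slice s (some p.2) (some (p.2 + m))], p.2 + m))]
    simp only [List.length_range]
    rw [pv_loopA s m N [] d]
    simp only [List.nil_append]
    -- both sides to sums
    rw [PySem.List.foldl_add _ (fun re => (PySem.List.min? re (fun x => x)).getD 0 * m) 0]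
    rw [PySem.List.foldl_add _ (fun i : Nat => (PySem.List.pyGet? s (n - m - m * (i:Int))).getD 0 * m) 0]
    -- pointwise: each box summand is s[d+i*m] * m
    have hpt : ∀ i, i < N →
        (PySem.List.min? (PySem.List.slice s (some (d + (i : Int) * m)) (some (d + (i : Int) * m + m))) (fun x => x)).getD 0 * m
        = (PySem.List.pyGet? s (d + (i : Int) * m)).getD 0 * m := by
      intro i hiN
      set j : Int := d + (i : Int) * m with hjdef
      have hj0 : 0 ≤ j := by positivity
      have hjm : j + m ≤ n := by
        have : ((i : Int) + 1) * m ≤ (N : Int) * m := by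
          apply mul_le_mul_of_nonneg_right _ (le_of_lt hpos)
          exact_mod_cast hiN
        nlinarith
      have hjlen : j.toNat < s.length := by
        have : j < n := by linarith
        omega
      have hslice : PySem.List.slice s (some j) (some (j + m)) =
          (s.drop j.toNat).take ((j + m).toNat - j.toNat) :=
        PySem.List.slice_toNat s hj0 (by linarith)
      have hmnat : (j + m).toNat - j.toNat = m.toNat := by omega
      rw [hslice, hmnat]
      set l := (s.drop j.toNat).take m.toNat with hldef
      have hlne : l ≠ [] := by
        have hll : l.length = min m.toNat (s.length - j.toNat) := by
          simp [hldef]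
        intro hc
        rw [hc] at hll
        simp at hll
        omega
      have hlsorted : l.Pairwise (· ≤ ·) := by
        have hsub : l.Sublist s := ((s.drop j.toNat).take_sublist m.toNat).trans (s.drop_sublist j.toNat)
        exact (PySem.List.sorted_pairwise score (fun x : Int => x)).sublist hsub
      rw [pv_min?_sorted l hlne hlsorted]
      have hhead : l[0]? = s[j.toNat]? := by
        rw [hldef]
        rw [List.getElem?_take_of_lt (by omega)]
        rw [List.getElem?_drop]
        norm_num
      rw [hhead, PySem.List.pyGet?_of_nonneg s hj0]
    -- A's sum as a map over range N of F
    have hmapA : (List.range N).map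
        ((fun re => (PySem.List.min? re (fun x => x)).getD 0 * m) ∘
          (fun i : Nat => PySem.List.slice s (some (d + (i : Int) * m)) (some (d + (i : Int) * m + m))))
        = (List.range N).map (fun i : Nat => (PySem.List.pyGet? s (d + (i : Int) * m)).getD 0 * m) := by
      apply List.map_congr_left
      intro i hi
      exact hpt i (List.mem_range.mp hi)
    -- B's summand at k is F (N-1-k)
    have hmapB : (List.range N).map (fun k : Nat => (PySem.List.pyGet? s (n - m - m * (k:Int))).getD 0 * m)
        = (List.range N).map (fun k : Nat =>
            (PySem.List.pyGet? s (d + ((N - 1 - k : Nat) : Int) * m)).getD 0 * m) := by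
      apply List.map_congr_left
      intro kk hk
      have hkN : kk < N := List.mem_range.mp hk
      have hidx : d + ((N - 1 - kk : Nat) : Int) * m = n - m - m * (kk : Int) := by
        have hc : ((N - 1 - kk : Nat) : Int) = (N : Int) - 1 - (kk : Int) := by
          push_cast [Nat.cast_sub (by omega : kk ≤ N - 1), Nat.cast_sub (by omega : 1 ≤ N)]
          ring
        rw [hc]; nlinarith [hsum]
      simp only [hidx]
    have hrefl := pv_sum_reflect (fun i : Nat => (PySem.List.pyGet? s (d + (i : Int) * m)).getD 0 * m) N
    rw [List.map_map, hmapA, hmapB, hrefl]
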